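-- pv_equiv track=rewrite | github.com/daalgi/algorithms | strings/detect_capital.py | count_capitals
-- ===== SOURCE A (Python) =====
-- def count_capitals(word: str) -> bool:
--     # Time complexity: O(n)
--     # Space complexity: O(1)
--     num_capital_letters = sum(ord(c) < ord("a") for c in word)
--     n = len(word)
--     if num_capital_letters == n or num_capital_letters == 0:
--         return True
--     if num_capital_letters == 1:
--         return ord(word[0]) < ord("a")
--     return False
-- ===== SOURCE B (Python) =====
-- def count_capitals(word: str) -> bool:
--     # Different decomposition: pivot on the first character, single scan of the rest.
--     if not word:
--         return True
--     first_capital = ord(word[0]) < ord("a")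
--     rest_all_upper = all(ord(c) < ord("a") for c in word[1:])
--     rest_all_lower = all(ord(c) >= ord("a") for c in word[1:])
--     if first_capital:
--         return rest_all_upper or rest_all_lower
--     return rest_all_lower
-- ===== Notes on version B (the rewrite author's own statement) =====
-- stated objective: alternative
-- what changed: Replaces the global capital count with a case split on the first character plus a single all()-scan of the tail (no counting, no length comparison, no post-hoc count==0/1/n branching).
import Mathlib
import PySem

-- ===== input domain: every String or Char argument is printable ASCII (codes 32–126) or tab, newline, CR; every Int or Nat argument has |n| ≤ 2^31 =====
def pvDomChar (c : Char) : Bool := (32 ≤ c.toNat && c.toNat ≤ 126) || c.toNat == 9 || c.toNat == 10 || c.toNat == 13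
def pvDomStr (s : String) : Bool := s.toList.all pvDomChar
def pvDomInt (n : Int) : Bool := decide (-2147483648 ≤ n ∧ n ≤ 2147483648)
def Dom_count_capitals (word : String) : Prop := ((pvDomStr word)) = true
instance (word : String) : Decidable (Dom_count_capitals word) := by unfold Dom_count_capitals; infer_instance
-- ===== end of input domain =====

-- B replaces A's global capital count and its count==0/1/n branching by a pivot on the
-- first character plus a single all-scan of the tail; same return value on every string.

-- ===== PORT A =====
-- literal port: count capitals (ord c < ord 'a'), compare the count with length, 0 and 1;
-- word[0] via PySem.Str.pyGet? (the `none` arm is unreachable: num = 1 forces word ≠ "")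
def count_capitals (word : String) : Bool :=
  let num : Int := word.toList.foldl (fun s c => s + (if c.toNat < 97 then 1 else 0)) 0
  let n : Int := PySem.Str.len word
  if num = n ∨ num = 0 then true
  else if num = 1 then
    match PySem.Str.pyGet? word 0 with
    | some c => decide (c.toNat < 97)
    | none => false
  else false

-- ===== PORT B =====
def count_capitals_alt (word : String) : Bool :=
  match word.toList with
  | [] => true
  | f :: rest =>
    let firstCapital := decide (f.toNat < 97)
    let restAllUpper := rest.all (fun c => decide (c.toNat < 97))
    let restAllLower := rest.all (fun c => decide (97 ≤ c.toNat))
    if firstCapital then restAllUpper || restAllLower else restAllLower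

-- ===== PRECONDITION & SPEC =====
def Spec_count_capitals (word : String) (out : Bool) : Prop := out = count_capitals_alt word
instance (word : String) (out : Bool) : Decidable (Spec_count_capitals word out) := by unfold Spec_count_capitals; infer_instance

-- ===== CLAIM (what is proved, stated in full; the proofs are below) =====
def Claim_equal_count_capitals : Prop := ∀ (word : String), Dom_count_capitals word → Spec_count_capitals word (count_capitals word)

-- ===== LEMMAS AND PROOFS =====

-- A's 0/1-sum over the word is the number of capitals (List.countP).
theorem fold_count (l : List Char) (a : Int) :
    l.foldl (fun s c => s + if c.toNat < 97 then 1 else 0) a =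
    a + (l.countP (fun c => decide (c.toNat < 97)) : Int) := by
  induction l generalizing a with
  | nil => simp
  | cons c t ih =>
    simp only [List.foldl_cons, List.countP_cons, ih]
    push_cast
    split_ifs with h <;> simp_all <;> omega

-- "every tail char is capital" ↔ "the capital count of the tail is its length"
theorem all_upper_eq (rest : List Char) :
    rest.all (fun c => decide (c.toNat < 97)) =
    decide (rest.countP (fun c => decide (c.toNat < 97)) = rest.length) := by
  rw [Bool.eq_iff_iff, List.all_eq_true, decide_eq_true_eq, List.countP_eq_length]

-- "no tail char is capital" ↔ "the capital count of the tail is zero"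
theorem all_lower_eq (rest : List Char) :
    rest.all (fun c => decide (97 ≤ c.toNat)) =
    decide (rest.countP (fun c => decide (c.toNat < 97)) = 0) := by
  rw [Bool.eq_iff_iff, List.all_eq_true, decide_eq_true_eq, List.countP_eq_zero]
  simp only [decide_eq_true_eq]
  constructor <;> (intro h a ha; have := h a ha; omega)

-- the branching of A and of B agree, stated over the tail count k, tail length m and
-- the first char's capital flag b
theorem branch_eq (b : Bool) (k m : Nat) (hk : k ≤ m) :
    (if ((k : Int) + (if b = true then (1:Int) else 0) = (m : Int) + 1 ∨
         (k : Int) + (if b = true then (1:Int) else 0) = 0) then true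
     else if (k : Int) + (if b = true then (1:Int) else 0) = 1 then b else false)
    = (if b then decide (k = m) || decide (k = 0) else decide (k = 0)) := by
  cases b <;> by_cases h1 : k = m <;> by_cases h2 : k = 0 <;>
    split_ifs <;> simp_all <;> omega

-- ===== VERDICT (by name: the statement is the Claim_ definition above) =====
theorem count_capitals_spec : Claim_equal_count_capitals := by
  intro word _
  unfold Spec_count_capitals count_capitals count_capitals_alt
  rw [fold_count]
  cases h : word.toList with
  | nil => simp [h, PySem.Str.len_eq]
  | cons f rest =>
    have hlen : (PySem.Str.len word : Int) = ((f :: rest).length : Int) := by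
      simp [PySem.Str.len_eq, h]
    have hget : PySem.Str.pyGet? word 0 = some f := by
      have := PySem.Str.pyGet?_natCast word 0
      simp only [h] at this
      simpa using this
    rw [hlen, hget]
    simp only [List.countP_cons, List.length_cons, all_upper_eq, all_lower_eq, zero_add]
    push_cast
    exact branch_eq (decide (f.toNat < 97)) _ _ List.countP_le_length
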